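-- pv_equiv track=rewrite | github.com/AMD-AGI/Primus-SaFE | Lens/modules/exporters/wandb-exporter/src/primus_lens_wandb_exporter/data_collector.py | _evaluate_confidence
-- ===== SOURCE A (Python) =====
-- from typing import Dict, List, Any, Optional
--
-- def _evaluate_confidence(indicators: List[str]) -> str:
--     """
--     Evaluate confidence level
--
--     Indicator strength levels:
--     - Strongest: import detection (actual module loaded)
--     - Strong: environment variables, FRAMEWORK/BACKEND variables
--     - Medium: wandb_config fields
--     - Weak: PyTorch modules, project names
--     """
--     # Strongest indicator: import detection
--     import_indicators = sum(1 for ind in indicators if ind.startswith("import."))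
--
--     # Strong indicators: environment variables
--     strong_indicators = sum(1 for ind in indicators
--                            if "env vars" in ind or "FRAMEWORK=" in ind or "BACKEND=" in ind)
--
--     # Medium indicators: wandb config
--     medium_indicators = sum(1 for ind in indicators
--                            if "wandb_config" in ind)
--
--     # If import detection exists, directly set high confidence
--     if import_indicators >= 1:
--         return "high"
--     elif strong_indicators >= 2:
--         return "high"
--     elif strong_indicators >= 1 or medium_indicators >= 2:
--         return "medium"
--     else:
--         return "low"
-- ===== SOURCE B (Python) =====
-- from typing import List
--
-- def _evaluate_confidence(indicators: List[str]) -> str: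
--     strong = 0
--     medium = 0
--     for ind in indicators:
--         if ind.startswith("import."):
--             return "high"
--         if "env vars" in ind or "FRAMEWORK=" in ind or "BACKEND=" in ind:
--             strong += 1
--         if "wandb_config" in ind:
--             medium += 1
--     if strong >= 2:
--         return "high"
--     if strong >= 1 or medium >= 2:
--         return "medium"
--     return "low"
-- ===== Notes on version B (the rewrite author's own statement) =====
-- stated objective: alternative
-- what changed: Replaces three separate comprehension scans plus a decision cascade by a single traversal that returns 'high' immediately at the first 'import.' indicator and otherwise maintains two counters, applying the cascade once at the end.
import Mathlib
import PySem

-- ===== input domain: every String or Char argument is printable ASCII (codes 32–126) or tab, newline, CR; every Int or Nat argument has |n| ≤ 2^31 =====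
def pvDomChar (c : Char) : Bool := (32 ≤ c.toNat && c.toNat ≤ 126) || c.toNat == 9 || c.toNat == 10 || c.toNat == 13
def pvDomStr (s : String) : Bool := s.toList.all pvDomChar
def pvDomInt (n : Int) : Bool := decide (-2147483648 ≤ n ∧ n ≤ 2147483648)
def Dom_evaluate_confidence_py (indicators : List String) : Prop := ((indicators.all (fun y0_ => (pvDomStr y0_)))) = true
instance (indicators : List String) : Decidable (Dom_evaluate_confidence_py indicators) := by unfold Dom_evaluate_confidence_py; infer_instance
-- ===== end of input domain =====

-- B replaces A's three comprehension scans by one traversal with an early "high" return on the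
-- first "import." indicator and two counters; same decision cascade, alternative decomposition.


-- ===== PORT A =====
def evaluate_confidence_py (indicators : List String) : String :=
  let import_indicators : Int :=
    indicators.foldl (fun acc ind => if PySem.Str.startswith ind "import." then acc + 1 else acc) 0
  let strong_indicators : Int :=
    indicators.foldl (fun acc ind =>
      if PySem.Str.isIn "env vars" ind || PySem.Str.isIn "FRAMEWORK=" ind || PySem.Str.isIn "BACKEND=" ind
      then acc + 1 else acc) 0
  let medium_indicators : Int :=
    indicators.foldl (fun acc ind => if PySem.Str.isIn "wandb_config" ind then acc + 1 else acc) 0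
  if import_indicators ≥ 1 then "high"
  else if strong_indicators ≥ 2 then "high"
  else if strong_indicators ≥ 1 ∨ medium_indicators ≥ 2 then "medium"
  else "low"

-- ===== PORT B =====
-- single pass: early return on "import.", two counters, cascade after the loop
def evalConfGo (strong medium : Int) : List String → String
  | [] =>
    if strong ≥ 2 then "high"
    else if strong ≥ 1 ∨ medium ≥ 2 then "medium"
    else "low"
  | ind :: rest =>
    if PySem.Str.startswith ind "import." then "high"
    else
      evalConfGo
        (if PySem.Str.isIn "env vars" ind || PySem.Str.isIn "FRAMEWORK=" ind || PySem.Str.isIn "BACKEND=" ind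
         then strong + 1 else strong)
        (if PySem.Str.isIn "wandb_config" ind then medium + 1 else medium)
        rest

def evaluate_confidence_py_alt (indicators : List String) : String :=
  evalConfGo 0 0 indicators

-- ===== PRECONDITION & SPEC =====
def Spec_evaluate_confidence_py (indicators : List String) (out : String) : Prop := out = evaluate_confidence_py_alt indicators
instance (indicators : List String) (out : String) : Decidable (Spec_evaluate_confidence_py indicators out) := by unfold Spec_evaluate_confidence_py; infer_instance

-- ===== CLAIM (what is proved, stated in full; the proofs are below) =====
def Claim_equal_evaluate_confidence_py : Prop := ∀ (indicators : List String), Dom_evaluate_confidence_py indicators → Spec_evaluate_confidence_py indicators (evaluate_confidence_py indicators)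

-- ===== LEMMAS AND PROOFS =====

def pImp (s : String) : Bool := PySem.Str.startswith s "import."
def pStr (s : String) : Bool :=
  PySem.Str.isIn "env vars" s || PySem.Str.isIn "FRAMEWORK=" s || PySem.Str.isIn "BACKEND=" s
def pMed (s : String) : Bool := PySem.Str.isIn "wandb_config" s

theorem evalConfGo_eq (l : List String) : ∀ (strong medium : Int),
    evalConfGo strong medium l =
      if l.any pImp then "high"
      else if strong + (l.countP pStr : Int) ≥ 2 then "high"
      else if strong + (l.countP pStr : Int) ≥ 1 ∨ medium + (l.countP pMed : Int) ≥ 2 then "medium"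
      else "low" := by
  induction l with
  | nil => intro s m; simp [evalConfGo]
  | cons hd tl ih =>
    intro s m
    by_cases hImp : pImp hd
    · simp [evalConfGo, pImp] at hImp ⊢
      simp [hImp]
    · simp only [evalConfGo, pImp] at hImp ⊢
      rw [if_neg hImp, ih, List.any_cons, List.countP_cons, List.countP_cons]
      simp only [pImp, hImp, Bool.false_or]
      by_cases hS : pStr hd <;> by_cases hM : pMed hd <;>
        simp [pStr, pMed] at hS hM <;>
        simp [pStr, pMed, hS, hM] <;> ring_nf

theorem countP_one_le_iff_any {α : Type} (p : α → Bool) (l : List α) :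
    (1 ≤ (l.countP p : Int)) ↔ l.any p = true := by
  rw [List.any_eq_true]
  constructor
  · intro h
    by_contra hc
    push Not at hc
    have : l.countP p = 0 := List.countP_eq_zero.mpr (fun a ha => by
      simpa using fun hp => hc a ha hp)
    omega
  · rintro ⟨x, hx, hpx⟩
    have : 0 < l.countP p := List.countP_pos_iff.mpr ⟨x, hx, hpx⟩
    omega

theorem evaluate_confidence_py_spec : Claim_equal_evaluate_confidence_py := by
  intro l _
  show evaluate_confidence_py l = evaluate_confidence_py_alt l
  unfold evaluate_confidence_py evaluate_confidence_py_alt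
  rw [evalConfGo_eq]
  unfold pImp pStr pMed
  rw [PySem.List.foldl_if_add_one, PySem.List.foldl_if_add_one, PySem.List.foldl_if_add_one]
  simp only [zero_add]
  by_cases hA : l.any (fun ind => PySem.Str.startswith ind "import.") = true
  · rw [if_pos ((countP_one_le_iff_any _ l).mpr hA), if_pos hA]
  · rw [if_neg (fun h => hA ((countP_one_le_iff_any _ l).mp h)), if_neg hA]
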